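-- pv_equiv track=rewrite | github.com/liskos/shlyk | variant_11/22.py | f
-- ===== SOURCE A (Python) =====
-- def f(x):
--     a = 0
--     b = 0
--     while x > 0:
--         if x % 2 == 1:
--             a = a + 1
--         else:
--             b = b + 1
--         x = x // 10
--     return a,b
-- ===== SOURCE B (Python) =====
-- def f(x):
--     if x <= 0:
--         return 0, 0
--     a = 0
--     b = 0
--     for d in str(x):
--         if d in "13579":
--             a = a + 1
--         else:
--             b = b + 1
--     return a, b
-- ===== Notes on version B (the rewrite author's own statement) =====
-- stated objective: idiomatic
-- what changed: B iterates once over the decimal string of x, classifying each digit character as odd/even, instead of A's while loop of repeated floor division and modulo.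
import Mathlib
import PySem

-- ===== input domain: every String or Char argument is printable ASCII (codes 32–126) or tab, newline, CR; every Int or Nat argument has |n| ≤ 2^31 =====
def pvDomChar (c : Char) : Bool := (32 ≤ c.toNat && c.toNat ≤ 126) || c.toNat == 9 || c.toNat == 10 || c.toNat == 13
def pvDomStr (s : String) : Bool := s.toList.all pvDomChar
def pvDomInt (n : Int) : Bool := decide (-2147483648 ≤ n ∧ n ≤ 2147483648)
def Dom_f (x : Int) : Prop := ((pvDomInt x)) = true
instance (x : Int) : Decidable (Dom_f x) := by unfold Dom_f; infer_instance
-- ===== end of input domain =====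

-- B classifies each character of str(x) as odd/even in one pass instead of A's
-- repeated floor division; same results, different decomposition (objective: idiomatic).

-- ===== PORT A =====
-- termination helper for A's while loop
theorem pv_fdiv10_lt (x : Int) (h : 0 < x) : (PySem.Int.floordiv x 10).toNat < x.toNat := by
  have hx : PySem.Int.floordiv x 10 = x / 10 :=
    Int.fdiv_eq_ediv_of_nonneg x (by norm_num)
  rw [hx]; omega

def fLoop (a b x : Int) : Int × Int :=
  if h : 0 < x then
    if PySem.Int.mod x 2 = 1 then
      fLoop (a + 1) b (PySem.Int.floordiv x 10)
    else
      fLoop a (b + 1) (PySem.Int.floordiv x 10)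
  else (a, b)
termination_by x.toNat
decreasing_by all_goals exact pv_fdiv10_lt x h

def f (x : Int) : Int × Int := fLoop 0 0 x

-- ===== PORT B =====
def f_alt (x : Int) : Int × Int :=
  if x ≤ 0 then (0, 0)
  else
    let r := (PySem.Int.toStr x).toList.foldl
      (fun (ab : Int × Int) d =>
        if ("13579".toList).contains d then (ab.1 + 1, ab.2) else (ab.1, ab.2 + 1))
      (0, 0)
    r

-- ===== PRECONDITION & SPEC =====
def Spec_f (x : Int) (out : Int × Int) : Prop := out = f_alt x
instance (x : Int) (out : Int × Int) : Decidable (Spec_f x out) := by unfold Spec_f; infer_instance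

-- ===== CLAIM (what is proved, stated in full; the proofs are below) =====
def Claim_equal_f : Prop := ∀ (x : Int), Dom_f x → Spec_f x (f x)

-- ===== LEMMAS AND PROOFS =====
def pvOdd (n : Nat) : Nat := (Nat.digits 10 n).countP (fun d => d % 2 == 1)
def pvEven (n : Nat) : Nat := (Nat.digits 10 n).countP (fun d => !(d % 2 == 1))

theorem pv_digitChar_mem (d : Nat) (hd : d < 10) :
    ("13579".toList).contains (Nat.digitChar d) = (d % 2 == 1) := by
  interval_cases d <;> decide

theorem pv_toDigitsCore_eq (fuel : Nat) : ∀ (n : Nat) (acc : List Char), 0 < n → n < fuel →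
    Nat.toDigitsCore 10 fuel n acc = ((Nat.digits 10 n).reverse.map Nat.digitChar) ++ acc := by
  induction fuel with
  | zero => intro n acc hn h; omega
  | succ fuel ih =>
    intro n acc hn h
    rw [Nat.toDigitsCore]
    have hd := Nat.digits_def' (b := 10) (by norm_num) hn
    by_cases h0 : n / 10 = 0
    · simp only [h0, if_true]
      rw [hd, h0]
      simp
    · simp only [h0, if_false]
      rw [ih (n / 10) _ (by omega) (by
        have : n / 10 < n := Nat.div_lt_self hn (by norm_num)
        omega)]
      rw [hd]
      simp

theorem pv_foldl_count (l : List Char) : ∀ (a b : Int),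
    l.foldl (fun (ab : Int × Int) d =>
        if ("13579".toList).contains d then (ab.1 + 1, ab.2) else (ab.1, ab.2 + 1)) (a, b)
      = (a + l.countP (fun d => ("13579".toList).contains d),
         b + l.countP (fun d => !("13579".toList).contains d)) := by
  induction l with
  | nil => intro a b; simp
  | cons c l ih =>
    intro a b
    by_cases hc : ("13579".toList).contains c = true
    · rw [List.foldl_cons, if_pos hc, ih, List.countP_cons, List.countP_cons, hc]
      simp; omega
    · simp only [Bool.not_eq_true] at hc
      rw [List.foldl_cons, if_neg (by rw [hc]; simp), ih, List.countP_cons, List.countP_cons, hc]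
      simp; omega

theorem pv_loop_eq : ∀ (n : Nat) (x a b : Int), x.toNat = n →
    fLoop a b x = (a + pvOdd n, b + pvEven n) := by
  intro n
  induction n using Nat.strong_induction_on with
  | _ n ih =>
    intro x a b hx
    rw [fLoop]
    by_cases hpos : 0 < x
    · have hn : 0 < n := by omega
      have hxn : x = (n : Int) := by omega
      have hmod : PySem.Int.mod x 2 = ((n % 2 : Nat) : Int) := by
        have h2 : PySem.Int.mod x 2 = x % 2 := by
          simp [PySem.Int.mod, Int.fmod_eq_emod]
        rw [h2, hxn]; omega
      have hdiv : PySem.Int.floordiv x 10 = ((n / 10 : Nat) : Int) := by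
        have h2 : PySem.Int.floordiv x 10 = x / 10 :=
          Int.fdiv_eq_ediv_of_nonneg x (by norm_num)
        rw [h2, hxn]; omega
      have hlt : n / 10 < n := Nat.div_lt_self hn (by norm_num)
      have hdig := Nat.digits_def' (b := 10) (by norm_num) hn
      have hmm : n % 10 % 2 = n % 2 := by omega
      have hOdd : pvOdd n = pvOdd (n / 10) + (if n % 2 = 1 then 1 else 0) := by
        unfold pvOdd; rw [hdig, List.countP_cons, hmm]
        by_cases hp : n % 2 = 1 <;> simp [hp]
      have hEven : pvEven n = pvEven (n / 10) + (if n % 2 = 1 then 0 else 1) := by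
        unfold pvEven; rw [hdig, List.countP_cons, hmm]
        by_cases hp : n % 2 = 1 <;> simp [hp]
      rw [dif_pos hpos]
      by_cases hp : n % 2 = 1
      · rw [hmod, if_pos (by rw [hp]; rfl)]
        rw [hdiv, ih (n / 10) hlt _ _ _ (by omega)]
        rw [hOdd, hEven]
        simp [hp]; omega
      · rw [hmod, if_neg (by omega)]
        rw [hdiv, ih (n / 10) hlt _ _ _ (by omega)]
        rw [hOdd, hEven]
        simp [hp]; omega
    · have hn0 : n = 0 := by omega
      rw [dif_neg hpos]
      simp [hn0, pvOdd, pvEven]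

theorem pv_alt_eq (x : Int) (h : 0 < x) :
    f_alt x = ((pvOdd x.toNat : Int), (pvEven x.toNat : Int)) := by
  unfold f_alt
  rw [if_neg (by omega)]
  have hchars : (PySem.Int.toStr x).toList = Nat.toDigits 10 x.toNat := by
    rw [PySem.Int.toList_toStr]
    unfold PySem.Int.toChars
    rw [if_neg (by omega)]
  rw [hchars]
  unfold Nat.toDigits
  rw [pv_toDigitsCore_eq _ x.toNat [] (by omega) (by omega)]
  rw [List.append_nil, pv_foldl_count]
  have hlt : ∀ d ∈ Nat.digits 10 x.toNat, d < 10 := fun d hd =>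
    Nat.digits_lt_base (by norm_num) hd
  have hOdd : ((Nat.digits 10 x.toNat).reverse.map Nat.digitChar).countP
      (fun d => ("13579".toList).contains d) = pvOdd x.toNat := by
    rw [List.countP_map, List.countP_reverse]
    exact List.countP_congr (fun d hd => by
      simp only [Function.comp]
      rw [pv_digitChar_mem d (hlt d hd)])
  have hEven : ((Nat.digits 10 x.toNat).reverse.map Nat.digitChar).countP
      (fun d => !("13579".toList).contains d) = pvEven x.toNat := by
    rw [List.countP_map, List.countP_reverse]
    exact List.countP_congr (fun d hd => by
      simp only [Function.comp]
      rw [pv_digitChar_mem d (hlt d hd)])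
  rw [hOdd, hEven]
  simp

-- ===== VERDICT (by name: the statement is the Claim_ definition above) =====
theorem f_spec : Claim_equal_f := by
  intro x _
  show f x = f_alt x
  unfold f
  rw [pv_loop_eq x.toNat x 0 0 rfl]
  by_cases h : 0 < x
  · rw [pv_alt_eq x h]; simp
  · have : x.toNat = 0 := by omega
    rw [this]
    unfold f_alt
    rw [if_pos (by omega)]
    simp [pvOdd, pvEven]
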